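-- pv_equiv track=rewrite | github.com/spicylemonade/AI_research | scripts/evaluate.py | parse_symbolic_to_prefix
-- ===== SOURCE A (Python) =====
-- def parse_symbolic_to_prefix(symbolic):
--     """Parse symbolic expression like ``mul(x1, pow(x2, 2))`` into prefix token list."""
--
--     def parse_expr(s, pos):
--         while pos < len(s) and s[pos] in " ,":
--             pos += 1
--         if pos >= len(s):
--             return [], pos
--         start = pos
--         while pos < len(s) and (s[pos].isalnum() or s[pos] in "_.-"):
--             pos += 1
--         name = s[start:pos]
--         while pos < len(s) and s[pos] == " ":
--             pos += 1
--         if pos < len(s) and s[pos] == "(":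
--             pos += 1
--             tokens_list = [name]
--             while pos < len(s) and s[pos] != ")":
--                 while pos < len(s) and s[pos] in " ,":
--                     pos += 1
--                 if pos < len(s) and s[pos] == ")":
--                     break
--                 child_tokens, pos = parse_expr(s, pos)
--                 tokens_list.extend(child_tokens)
--             if pos < len(s) and s[pos] == ")":
--                 pos += 1
--             return tokens_list, pos
--         else:
--             return [name], pos
--
--     result, _ = parse_expr(symbolic, 0)
--     return result
-- ===== SOURCE B (Python) =====
-- def parse_symbolic_to_prefix(symbolic):
--     """Iterative single-pass parse: one pos pointer and an explicit depth counter
--     instead of recursive descent; tokens accumulate in one flat list."""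
--     s = symbolic
--     n = len(s)
--     pos = 0
--     while pos < n and s[pos] in " ,":
--         pos += 1
--     if pos >= n:
--         return []
--     out = []
--     depth = 0
--     while True:
--         # read one (possibly empty) name
--         start = pos
--         while pos < n and (s[pos].isalnum() or s[pos] in "_.-"):
--             pos += 1
--         out.append(s[start:pos])
--         while pos < n and s[pos] == " ":
--             pos += 1
--         if pos < n and s[pos] == "(":
--             depth += 1
--             pos += 1
--         elif depth == 0:
--             return out
--         # separator / closing phase (depth > 0 here)
--         while True:
--             while pos < n and s[pos] in " ,":
--                 pos += 1
--             if pos >= n: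
--                 return out
--             c = s[pos]
--             if c == ")":
--                 depth -= 1
--                 pos += 1
--                 if depth == 0:
--                     return out
--             elif c.isalnum() or c in "_.-(":
--                 break
--             else:
--                 return out  # unexpected character: stop parsing
-- ===== Notes on version B (the rewrite author's own statement) =====
-- stated objective: alternative
-- what changed: Replaces A's recursive-descent parse_expr (one recursive call per subexpression, nested argument loops, token lists spliced together by extend) with a single iterative left-to-right scan that keeps one position pointer, an explicit parenthesis-depth counter and one flat output list; Pre_ excludes only the inputs on which A loops forever (a character of no token class inside the parenthesised region).
import Mathlib
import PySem

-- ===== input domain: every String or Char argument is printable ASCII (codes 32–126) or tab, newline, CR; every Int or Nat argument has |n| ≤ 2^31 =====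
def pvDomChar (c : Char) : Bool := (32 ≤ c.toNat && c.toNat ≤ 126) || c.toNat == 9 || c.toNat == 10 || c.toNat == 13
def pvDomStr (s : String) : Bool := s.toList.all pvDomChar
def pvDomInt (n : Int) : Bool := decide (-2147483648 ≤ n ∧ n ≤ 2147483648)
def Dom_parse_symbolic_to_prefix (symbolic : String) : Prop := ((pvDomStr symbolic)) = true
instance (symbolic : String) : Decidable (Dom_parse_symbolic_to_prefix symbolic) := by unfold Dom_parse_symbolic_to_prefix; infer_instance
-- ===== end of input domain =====

-- B replaces A's recursive-descent parser by a single iterative scan with a pos pointer and an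
-- explicit depth counter (objective: alternative decomposition; no speed claim).

-- ===== PORT A =====

-- character classes shared by both ports (s[pos] in " ,"; s[pos].isalnum() or s[pos] in "_.-")
def isSepC (c : Char) : Bool := c = ' ' || c = ','
def isNameC (c : Char) : Bool := PySem.Chars.isalnum c || c = '_' || c = '.' || c = '-'
-- `if pos < len(s) and s[pos] == ")": pos += 1`
def dropClose (l : List Char) : List Char := if l.head? = some ')' then l.tail else l

-- literal port of A's recursive `parse_expr` (state = the remaining suffix of the char list;
-- the fuel only makes the recursion total: Python A recurses forever outside Pre_)
mutual
def parseExprA : Nat → List Char → List String × List Char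
  | 0, l => ([], l)
  | f + 1, l =>
    let l1 := l.dropWhile isSepC
    if l1.isEmpty then ([], l1)
    else
      let name := String.ofList (l1.takeWhile isNameC)
      let l2 := l1.dropWhile isNameC
      let l3 := l2.dropWhile (fun c => c = ' ')
      if l3.head? = some '(' then
        let p := argLoopA f l3.tail
        (name :: p.1, dropClose p.2)
      else ([name], l3)
-- A's inner `while pos < len(s) and s[pos] != ")"` argument loop
def argLoopA : Nat → List Char → List String × List Char
  | 0, l => ([], l)
  | f + 1, l =>
    match l with
    | [] => ([], [])
    | c :: _ =>
      if c = ')' then ([], l)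
      else
        let l1 := l.dropWhile isSepC
        if l1.head? = some ')' then ([], l1)
        else
          let p := parseExprA f l1
          let q := argLoopA f p.2
          (p.1 ++ q.1, q.2)
end

def parse_symbolic_to_prefix (symbolic : String) : List String :=
  (parseExprA (2 * symbolic.toList.length + 4) symbolic.toList).1

-- ===== PORT B =====

-- literal port of Source B: the outer loop reads one (possibly empty) name and a possible '(',
-- the inner loop skips separators and closing parens; the fuel only makes the loops total
mutual
def loopB : Nat → List Char → Nat → List String → List String
  | 0, _, _, acc => acc
  | f + 1, l, d, acc =>
    let name := String.ofList (l.takeWhile isNameC)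
    let l2 := l.dropWhile isNameC
    let l3 := l2.dropWhile (fun c => c = ' ')
    let acc1 := acc ++ [name]
    if l3.head? = some '(' then skipB f l3.tail (d + 1) acc1
    else if d = 0 then acc1
    else skipB f l3 d acc1
def skipB : Nat → List Char → Nat → List String → List String
  | 0, _, _, acc => acc
  | f + 1, l, d, acc =>
    match l.dropWhile isSepC with
    | [] => acc
    | c :: rest =>
      if c = ')' then (if d = 1 then acc else skipB f rest (d - 1) acc)
      else if isNameC c || c = '(' then loopB f (c :: rest) d acc
      else acc
end

def parse_symbolic_to_prefix_alt (symbolic : String) : List String :=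
  let l0 := symbolic.toList.dropWhile isSepC
  if l0.isEmpty then [] else loopB (2 * l0.length + 4) l0 0 []

-- ===== PRECONDITION & SPEC =====

-- paren-depth scan: true iff no foreign character occurs before the d pending ')' are closed
def RG : List Char → Nat → Bool
  | _, 0 => true
  | [], _ => true
  | c :: r, d + 1 =>
    if c = ')' then RG r d
    else if c = '(' then RG r (d + 2)
    else if isNameC c || isSepC c then RG r (d + 1)
    else false

def preCheck (symbolic : String) : Bool :=
  let l0 := symbolic.toList.dropWhile isSepC
  let l3 := (l0.dropWhile isNameC).dropWhile (fun c => c = ' ')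
  if l3.head? = some '(' then RG l3.tail 1 else true

-- Pre_ excludes exactly the inputs on which Python A never returns (its argument loop repeats
-- forever): those with a character that is not alphanumeric, underscore, dot, dash, space,
-- comma or a parenthesis strictly inside the parenthesised region of the first expression.
def Pre_parse_symbolic_to_prefix (symbolic : String) : Prop := preCheck symbolic = true
instance (symbolic : String) : Decidable (Pre_parse_symbolic_to_prefix symbolic) := by
  unfold Pre_parse_symbolic_to_prefix; infer_instance

def pvWitness_parse_symbolic_to_prefix : String := "mul(x1, pow(x2, 2))"

def Spec_parse_symbolic_to_prefix (symbolic : String) (out : List String) : Prop := out = parse_symbolic_to_prefix_alt symbolic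
instance (symbolic : String) (out : List String) : Decidable (Spec_parse_symbolic_to_prefix symbolic out) := by unfold Spec_parse_symbolic_to_prefix; infer_instance

-- ===== CLAIM (what is proved, stated in full; the proofs are below) =====
def Claim_equal_parse_symbolic_to_prefix : Prop := ∀ (symbolic : String), Dom_parse_symbolic_to_prefix symbolic → Pre_parse_symbolic_to_prefix symbolic → Spec_parse_symbolic_to_prefix symbolic (parse_symbolic_to_prefix symbolic)

-- ===== LEMMAS AND PROOFS =====

lemma sep_cases {c : Char} (h : isSepC c = true) : c = ' ' ∨ c = ',' := by
  simpa [isSepC] using h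

lemma nameC_not_sep {c : Char} (h : isNameC c = true) : isSepC c = false := by
  by_contra hne
  rcases sep_cases (by simpa using hne) with rfl | rfl <;> revert h <;> decide

lemma good_not_sep {c : Char} (h : (isNameC c || c = '(') = true) : isSepC c = false := by
  rcases Bool.or_eq_true_iff.1 h with h1 | h1
  · exact nameC_not_sep h1
  · simp at h1; subst h1; decide

lemma nameC_ne_close {c : Char} (h : isNameC c = true) : c ≠ ')' := by
  rintro rfl; revert h; decide

lemma nameC_ne_open {c : Char} (h : isNameC c = true) : c ≠ '(' := by
  rintro rfl; revert h; decide

lemma dropWhile_head_false {p : Char → Bool} : ∀ {l : List Char} {c : Char} {r : List Char},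
    l.dropWhile p = c :: r → p c = false := by
  intro l
  induction l with
  | nil => intro c r h; simp at h
  | cons a t ih =>
    intro c r h
    by_cases ha : p a = true
    · rw [List.dropWhile_cons_of_pos ha] at h; exact ih h
    · rw [List.dropWhile_cons_of_neg (by simpa using ha)] at h
      cases h; simpa using ha

lemma dropWhile_self_of_head {p : Char → Bool} {c : Char} {r : List Char} (h : p c = false) :
    (c :: r).dropWhile p = c :: r :=
  List.dropWhile_cons_of_neg (by simp [h])

lemma parseExprA_nil (f : Nat) : parseExprA f [] = ([], []) := by
  cases f <;> simp [parseExprA]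

lemma argLoopA_nil (f : Nat) : argLoopA f [] = ([], []) := by
  cases f <;> simp [argLoopA]

lemma skipB_nil {g d : Nat} {acc : List String} (h : 1 ≤ g) : skipB g [] d acc = acc := by
  obtain ⟨g', rfl⟩ : ∃ g', g = g' + 1 := ⟨g - 1, by omega⟩
  simp [skipB]

lemma dropClose_len_le (l : List Char) : (dropClose l).length ≤ l.length := by
  unfold dropClose; split <;> cases l <;> simp_all

-- the parser never moves the position backwards
lemma lenA : ∀ f : Nat,
    (∀ l, (parseExprA f l).2.length ≤ l.length) ∧ (∀ l, (argLoopA f l).2.length ≤ l.length) := by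
  have hdw : ∀ (p : Char → Bool) (l : List Char), (List.dropWhile p l).length ≤ l.length :=
    fun _ _ => List.length_dropWhile_le ..
  intro f
  induction f with
  | zero => constructor <;> intro l <;> simp [parseExprA, argLoopA]
  | succ f ih =>
    constructor
    · intro l
      by_cases he : (l.dropWhile isSepC).isEmpty
      · simp only [parseExprA, if_pos he]
        simpa using hdw isSepC l
      · simp only [parseExprA, if_neg he]
        have hl3 : (((l.dropWhile isSepC).dropWhile isNameC).dropWhile (fun c => c = ' ')).length ≤ l.length :=
          le_trans (hdw ..) (le_trans (hdw ..) (hdw ..))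
        by_cases hh : (((l.dropWhile isSepC).dropWhile isNameC).dropWhile (fun c => c = ' ')).head? = some '('
        · simp only [if_pos hh]
          refine le_trans (dropClose_len_le _) (le_trans (ih.2 _) ?_)
          have ht : ((((l.dropWhile isSepC).dropWhile isNameC).dropWhile (fun c => c = ' ')).tail).length
              = (((l.dropWhile isSepC).dropWhile isNameC).dropWhile (fun c => c = ' ')).length - 1 :=
            List.length_tail
          omega
        · simp only [if_neg hh]
          exact hl3
    · intro l
      cases l with
      | nil => simp [argLoopA]
      | cons c r =>
        by_cases hc : c = ')'
        · simp [argLoopA, hc]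
        · simp only [argLoopA, if_neg hc]
          by_cases hh : ((c :: r).dropWhile isSepC).head? = some ')'
          · simp only [if_pos hh]
            simpa using hdw isSepC (c :: r)
          · simp only [if_neg hh]
            exact le_trans (ih.2 _) (le_trans (ih.1 _) (hdw ..))

-- and strictly consumes at least one character on a name-or-'(' head
lemma ltA {f : Nat} {c : Char} {r : List Char} (hc : (isNameC c || c = '(') = true) :
    (parseExprA (f + 1) (c :: r)).2.length < (c :: r).length := by
  have hdw : ∀ (p : Char → Bool) (l : List Char), (List.dropWhile p l).length ≤ l.length :=
    fun _ _ => List.length_dropWhile_le ..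
  have hsep : isSepC c = false := good_not_sep hc
  simp only [parseExprA, dropWhile_self_of_head hsep, List.isEmpty_cons, Bool.false_eq_true,
    if_false]
  rcases Bool.or_eq_true_iff.1 hc with h1 | h1
  · have hdropN : (c :: r).dropWhile isNameC = r.dropWhile isNameC :=
      List.dropWhile_cons_of_pos h1
    rw [hdropN]
    have hl3 : ((r.dropWhile isNameC).dropWhile (fun c => c = ' ')).length ≤ r.length :=
      le_trans (hdw ..) (hdw ..)
    by_cases hh : ((r.dropWhile isNameC).dropWhile (fun c => c = ' ')).head? = some '('
    · rw [if_pos hh]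
      refine lt_of_le_of_lt (le_trans (dropClose_len_le _) ((lenA f).2 _)) ?_
      have ht : (((r.dropWhile isNameC).dropWhile (fun c => c = ' ')).tail).length
          = ((r.dropWhile isNameC).dropWhile (fun c => c = ' ')).length - 1 := List.length_tail
      simp only [List.length_cons]
      omega
    · rw [if_neg hh]
      simp only [List.length_cons]
      omega
  · simp only [decide_eq_true_eq] at h1
    subst h1
    have h2 : ('(' :: r).dropWhile isNameC = '(' :: r := dropWhile_self_of_head (by decide)
    have h3 : ('(' :: r).dropWhile (fun c => c = ' ') = '(' :: r :=
      List.dropWhile_cons_of_neg (by decide)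
    rw [h2, h3, if_pos (by simp)]
    refine lt_of_le_of_lt (le_trans (dropClose_len_le _) ((lenA f).2 _)) ?_
    simp

-- RG facts
lemma RG_nil (d : Nat) : RG [] d = true := by cases d <;> simp [RG]

lemma RG_close {r : List Char} {d : Nat} (hd : 1 ≤ d) : RG (')' :: r) d = RG r (d - 1) := by
  obtain ⟨d', rfl⟩ : ∃ d', d = d' + 1 := ⟨d - 1, by omega⟩
  simp [RG]

lemma RG_open {r : List Char} {d : Nat} (hd : 1 ≤ d) : RG ('(' :: r) d = RG r (d + 1) := by
  obtain ⟨d', rfl⟩ : ∃ d', d = d' + 1 := ⟨d - 1, by omega⟩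
  simp [RG]

lemma RG_good_cons {c : Char} {r : List Char} {d : Nat} (hd : 1 ≤ d)
    (h : (isNameC c || isSepC c) = true) : RG (c :: r) d = RG r d := by
  obtain ⟨d', rfl⟩ : ∃ d', d = d' + 1 := ⟨d - 1, by omega⟩
  have hc1 : c ≠ ')' := by
    rcases Bool.or_eq_true_iff.1 h with h1 | h1
    · exact nameC_ne_close h1
    · rcases sep_cases h1 with rfl | rfl <;> decide
  have hc2 : c ≠ '(' := by
    rcases Bool.or_eq_true_iff.1 h with h1 | h1
    · exact nameC_ne_open h1
    · rcases sep_cases h1 with rfl | rfl <;> decide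
  simp [RG, hc1, hc2, h]

lemma RG_dropWhile {p : Char → Bool} (hp : ∀ c, p c = true → (isNameC c || isSepC c) = true) :
    ∀ {l : List Char} {d : Nat}, 1 ≤ d → RG l d = true → RG (l.dropWhile p) d = true := by
  intro l
  induction l with
  | nil => intro d _ h; simpa using h
  | cons c t ih =>
    intro d hd h
    by_cases hc : p c = true
    · rw [List.dropWhile_cons_of_pos hc]
      exact ih hd (by rwa [RG_good_cons hd (hp c hc)] at h)
    · rwa [List.dropWhile_cons_of_neg (by simpa using hc)]

lemma RG_head_good {c : Char} {r : List Char} {d : Nat} (hd : 1 ≤ d)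
    (h : RG (c :: r) d = true) (hc : c ≠ ')') (hs : isSepC c = false) :
    (isNameC c || c = '(') = true := by
  obtain ⟨d', rfl⟩ : ∃ d', d = d' + 1 := ⟨d - 1, by omega⟩
  by_cases ho : c = '('
  · simp [ho]
  · simp only [RG, if_neg hc, if_neg ho] at h
    rcases hb : isNameC c with _ | _
    · rw [hb, hs] at h; simp at h
    · simp

-- the two statements of the main induction, parameterised by a length bound:
-- EP: at a fresh-expression position, B's outer loop = parse one A-expression, then B's
--     skip loop from A's end position;  LP: at a skip position with d pending ')', B's skip
--     loop = A's argument loop, close one ')', and continue one level up.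
def EP (n : Nat) : Prop := ∀ (l : List Char) (d : Nat) (acc : List String) (fa fb : Nat)
    (c : Char) (r : List Char), l = c :: r → (isNameC c || c = '(') = true →
    l.length ≤ n → 1 ≤ d → RG l d = true →
    2 * l.length + 2 ≤ fa → 2 * l.length + 2 ≤ fb →
    RG (parseExprA fa l).2 d = true ∧
    ∀ g, 2 * (parseExprA fa l).2.length + 3 ≤ g →
      loopB fb l d acc = skipB g (parseExprA fa l).2 d (acc ++ (parseExprA fa l).1)

def LP (n : Nat) : Prop := ∀ (l : List Char) (d : Nat) (acc : List String) (fa fb : Nat),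
    l.length ≤ n → 1 ≤ d → RG l d = true →
    2 * l.length + 3 ≤ fa → 2 * l.length + 3 ≤ fb →
    RG (dropClose (argLoopA fa l).2) (d - 1) = true ∧
    ∀ g, 2 * (dropClose (argLoopA fa l).2).length + 3 ≤ g →
      skipB fb l d acc = if d = 1 then acc ++ (argLoopA fa l).1
        else skipB g (dropClose (argLoopA fa l).2) (d - 1) (acc ++ (argLoopA fa l).1)

lemma mainEL : ∀ n : Nat, EP n ∧ LP n := by
  intro n
  induction n using Nat.strong_induction_on with
  | _ n ih =>
    have hE : EP n := by
      intro l d acc fa fb c r rfl hc hn hd hRG hfa hfb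
      have hsep : isSepC c = false := good_not_sep hc
      obtain ⟨fa', rfl⟩ : ∃ fa', fa = fa' + 1 := ⟨fa - 1, by omega⟩
      obtain ⟨fb', rfl⟩ : ∃ fb', fb = fb' + 1 := ⟨fb - 1, by omega⟩
      simp only [parseExprA, loopB, dropWhile_self_of_head hsep, List.isEmpty_cons,
        Bool.false_eq_true, if_false]
      have hRG3 : RG (((c :: r).dropWhile isNameC).dropWhile (fun c => c = ' ')) d = true := by
        refine RG_dropWhile (p := fun c => c = ' ') (fun x hx => ?_) hd
          (RG_dropWhile (p := isNameC) (fun x hx => by simp [hx]) hd hRG)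
        simp only [decide_eq_true_eq] at hx
        subst hx
        decide
      have hlen3 : (((c :: r).dropWhile isNameC).dropWhile (fun c => c = ' ')).length ≤ r.length + 1 := by
        refine le_trans (List.length_dropWhile_le ..) (le_trans (List.length_dropWhile_le ..) ?_)
        simp
      by_cases hh : (((c :: r).dropWhile isNameC).dropWhile (fun c => c = ' ')).head? = some '('
      · obtain ⟨rest, hrest⟩ : ∃ rest,
            ((c :: r).dropWhile isNameC).dropWhile (fun c => c = ' ') = '(' :: rest := by
          cases hl : ((c :: r).dropWhile isNameC).dropWhile (fun c => c = ' ') with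
          | nil => rw [hl] at hh; simp at hh
          | cons x xs =>
            rw [hl] at hh; simp only [List.head?_cons, Option.some.injEq] at hh
            exact ⟨xs, by rw [hh]⟩
        rw [if_pos hh, if_pos hh, hrest]
        simp only [List.tail_cons]
        have hlenrest : rest.length + 1 ≤ r.length + 1 := by
          rw [hrest] at hlen3; simpa using hlen3
        have hRGrest : RG rest (d + 1) = true := by
          rw [hrest, RG_open hd] at hRG3; exact hRG3
        have hne : rest.length < n := by simp only [List.length_cons] at hn; omega
        have hLP := (ih rest.length hne).2 rest (d + 1)
          (acc ++ [String.ofList ((c :: r).takeWhile isNameC)]) fa' fb'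
          le_rfl (by omega) hRGrest
          (by simp only [List.length_cons] at hfa; omega)
          (by simp only [List.length_cons] at hfb; omega)
        obtain ⟨hRGq, hrun⟩ := hLP
        constructor
        · simpa using hRGq
        · intro g hg
          have hrg := hrun g (by simpa using hg)
          rw [if_neg (by omega)] at hrg
          rw [hrg]
          simp
      · rw [if_neg hh, if_neg hh, if_neg (by omega : ¬ d = 0)]
        refine ⟨hRG3, ?_⟩
        intro g hg
        have hcname : isNameC c = true := by
          rcases Bool.or_eq_true_iff.1 hc with h1 | h1
          · exact h1
          · exfalso
            simp only [decide_eq_true_eq] at h1; subst h1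
            have e2 : ('(' :: r).dropWhile isNameC = '(' :: r :=
              dropWhile_self_of_head (by decide)
            have e3 : ('(' :: r).dropWhile (fun c => c = ' ') = '(' :: r :=
              List.dropWhile_cons_of_neg (by decide)
            rw [e2, e3] at hh
            simp at hh
        have hdropN : (c :: r).dropWhile isNameC = r.dropWhile isNameC :=
          List.dropWhile_cons_of_pos hcname
        have hlt : (((c :: r).dropWhile isNameC).dropWhile (fun c => c = ' ')).length < r.length + 1 := by
          rw [hdropN]
          have := le_trans (List.length_dropWhile_le
            (p := fun c => decide (c = ' ')) (l := r.dropWhile isNameC))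
            (List.length_dropWhile_le (p := isNameC) (l := r))
          omega
        have hlen : (((c :: r).dropWhile isNameC).dropWhile (fun c => c = ' ')).length < n := by
          simp only [List.length_cons] at hn; omega
        have s1 := (ih _ hlen).2 (((c :: r).dropWhile isNameC).dropWhile (fun c => c = ' ')) d
          (acc ++ [String.ofList ((c :: r).takeWhile isNameC)])
          (2 * (((c :: r).dropWhile isNameC).dropWhile (fun c => c = ' ')).length + 3) fb'
          le_rfl hd hRG3 le_rfl (by simp only [List.length_cons] at hfb; omega)
        have s2 := (ih _ hlen).2 (((c :: r).dropWhile isNameC).dropWhile (fun c => c = ' ')) d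
          (acc ++ [String.ofList ((c :: r).takeWhile isNameC)])
          (2 * (((c :: r).dropWhile isNameC).dropWhile (fun c => c = ' ')).length + 3) g
          le_rfl hd hRG3 le_rfl hg
        exact (s1.2 _ le_rfl).trans (s2.2 _ le_rfl).symm
    have hL : LP n := by
      intro l d acc fa fb hn hd hRG hfa hfb
      obtain ⟨fa', rfl⟩ : ∃ fa', fa = fa' + 1 := ⟨fa - 1, by omega⟩
      obtain ⟨fb', rfl⟩ : ∃ fb', fb = fb' + 1 := ⟨fb - 1, by omega⟩
      cases hl1 : l.dropWhile isSepC with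
      | nil =>
        have hAeq : argLoopA (fa' + 1) l = ([], []) := by
          cases l with
          | nil => exact argLoopA_nil _
          | cons c r =>
            have hcsep : isSepC c = true := by
              by_contra hcf
              rw [dropWhile_self_of_head (by simpa using hcf)] at hl1
              simp at hl1
            have hcne : ¬ c = ')' := by rintro rfl; exact absurd hcsep (by decide)
            simp only [argLoopA, if_neg hcne, hl1]
            rw [if_neg (by simp)]
            simp [parseExprA_nil, argLoopA_nil]
        rw [hAeq]
        have hB : skipB (fb' + 1) l d acc = acc := by
          simp only [skipB, hl1]
        constructor
        · simp [dropClose, RG_nil]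
        · intro g hg
          rw [hB]
          simp only [dropClose, List.head?_nil, List.append_nil, reduceCtorEq, if_false]
          by_cases hd1 : d = 1
          · simp [hd1]
          · rw [if_neg hd1, skipB_nil (by omega)]
      | cons c1 rest1 =>
        have hc1sep : isSepC c1 = false := dropWhile_head_false hl1
        have hlen1 : rest1.length + 1 ≤ l.length := by
          have h := List.length_dropWhile_le (p := isSepC) (l := l)
          rw [hl1] at h; simpa using h
        have hRG1 : RG (c1 :: rest1) d = true := by
          have h := RG_dropWhile (p := isSepC) (fun x hx => by simp [hx]) hd hRG
          rwa [hl1] at h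
        by_cases hc1 : c1 = ')'
        · subst hc1
          have hAeq : argLoopA (fa' + 1) l = ([], ')' :: rest1) := by
            cases l with
            | nil => simp at hl1
            | cons c r =>
              by_cases hc : c = ')'
              · subst hc
                rw [dropWhile_self_of_head (by decide)] at hl1
                cases hl1
                simp [argLoopA]
              · simp only [argLoopA, if_neg hc, hl1]
                rw [if_pos (by simp)]
          rw [hAeq]
          have hRGrest : RG rest1 (d - 1) = true := by rwa [RG_close hd] at hRG1
          have hdc : dropClose (')' :: rest1) = rest1 := by simp [dropClose]
          constructor
          · rw [hdc]; exact hRGrest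
          · intro g hg
            rw [hdc] at hg
            have hB : skipB (fb' + 1) l d acc =
                if d = 1 then acc else skipB fb' rest1 (d - 1) acc := by
              simp only [skipB, hl1]
              simp
            rw [hB, hdc]
            simp only [List.append_nil]
            by_cases hd1 : d = 1
            · simp [hd1]
            · rw [if_neg hd1, if_neg hd1]
              have hdm : 1 ≤ d - 1 := by omega
              have hrlt : rest1.length < n := by omega
              have s1 := (ih _ hrlt).2 rest1 (d - 1) acc (2 * rest1.length + 3) fb'
                le_rfl hdm hRGrest le_rfl (by omega)
              have s2 := (ih _ hrlt).2 rest1 (d - 1) acc (2 * rest1.length + 3) g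
                le_rfl hdm hRGrest le_rfl (by omega)
              exact (s1.2 _ le_rfl).trans (s2.2 _ le_rfl).symm
        · have hc1good : (isNameC c1 || c1 = '(') = true := RG_head_good hd hRG1 hc1 hc1sep
          have hAeq : argLoopA (fa' + 1) l =
              ((parseExprA fa' (c1 :: rest1)).1 ++ (argLoopA fa' (parseExprA fa' (c1 :: rest1)).2).1,
               (argLoopA fa' (parseExprA fa' (c1 :: rest1)).2).2) := by
            cases l with
            | nil => simp at hl1
            | cons c r =>
              have hcne : ¬ c = ')' := by
                rintro rfl
                rw [dropWhile_self_of_head (by decide)] at hl1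
                cases hl1
                exact hc1 rfl
              simp only [argLoopA, if_neg hcne, hl1]
              rw [if_neg (by simp [hc1])]
          rw [hAeq]
          have hB : skipB (fb' + 1) l d acc = loopB fb' (c1 :: rest1) d acc := by
            simp only [skipB, hl1]
            rw [if_neg hc1, if_pos hc1good]
          have hlln : (c1 :: rest1).length ≤ n := by
            simp only [List.length_cons]; omega
          have hEapp := hE (c1 :: rest1) d acc fa' fb' c1 rest1 rfl hc1good hlln hd hRG1
            (by simp only [List.length_cons]; omega)
            (by simp only [List.length_cons]; omega)
          obtain ⟨hRGm, hrunE⟩ := hEapp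
          have hmlt : (parseExprA fa' (c1 :: rest1)).2.length < rest1.length + 1 := by
            obtain ⟨fa'', rfl⟩ : ∃ fa'', fa' = fa'' + 1 := ⟨fa' - 1, by omega⟩
            simpa using ltA (f := fa'') (c := c1) (r := rest1) hc1good
          have hmn : (parseExprA fa' (c1 :: rest1)).2.length < n := by omega
          have hLPm := (ih _ hmn).2 (parseExprA fa' (c1 :: rest1)).2 d
            (acc ++ (parseExprA fa' (c1 :: rest1)).1) fa'
            (2 * (parseExprA fa' (c1 :: rest1)).2.length + 3)
            le_rfl hd hRGm (by omega) le_rfl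
          obtain ⟨hRGq, hrunL⟩ := hLPm
          constructor
          · exact hRGq
          · intro g hg
            rw [hB, hrunE (2 * (parseExprA fa' (c1 :: rest1)).2.length + 3) le_rfl]
            rw [hrunL g (by simpa using hg)]
            by_cases hd1 : d = 1
            · simp [hd1]
            · rw [if_neg hd1, if_neg hd1]
              simp [List.append_assoc]
    exact ⟨hE, hL⟩

-- ===== VERDICT (by name: the statement is the Claim_ definition above) =====
theorem parse_symbolic_to_prefix_spec : Claim_equal_parse_symbolic_to_prefix := by
  intro s hdom hpre
  unfold Spec_parse_symbolic_to_prefix parse_symbolic_to_prefix parse_symbolic_to_prefix_alt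
  unfold Pre_parse_symbolic_to_prefix preCheck at hpre
  rw [show 2 * s.toList.length + 4 = (2 * s.toList.length + 3) + 1 from rfl]
  by_cases h0 : (s.toList.dropWhile isSepC).isEmpty
  · simp [parseExprA, h0]
  · simp only [parseExprA, if_neg h0]
    rw [show 2 * (s.toList.dropWhile isSepC).length + 4
        = (2 * (s.toList.dropWhile isSepC).length + 3) + 1 from rfl]
    simp only [loopB]
    have hlen0 : (s.toList.dropWhile isSepC).length ≤ s.toList.length :=
      List.length_dropWhile_le ..
    by_cases h3 : (((s.toList.dropWhile isSepC).dropWhile isNameC).dropWhile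
        (fun c => c = ' ')).head? = some '('
    · rw [if_pos h3, if_pos h3]
      rw [if_pos h3] at hpre
      obtain ⟨rest, hrest⟩ : ∃ rest,
          ((s.toList.dropWhile isSepC).dropWhile isNameC).dropWhile (fun c => c = ' ')
            = '(' :: rest := by
        cases hl : ((s.toList.dropWhile isSepC).dropWhile isNameC).dropWhile
            (fun c => c = ' ') with
        | nil => rw [hl] at h3; simp at h3
        | cons x xs =>
          rw [hl] at h3; simp only [List.head?_cons, Option.some.injEq] at h3
          exact ⟨xs, by rw [h3]⟩
      rw [hrest] at hpre ⊢
      simp only [List.tail_cons] at hpre ⊢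
      have hlenr : rest.length + 1 ≤ (s.toList.dropWhile isSepC).length := by
        have h := le_trans (List.length_dropWhile_le
            (p := fun c => decide (c = ' ')) (l := (s.toList.dropWhile isSepC).dropWhile isNameC))
          (List.length_dropWhile_le (p := isNameC) (l := s.toList.dropWhile isSepC))
        rw [hrest] at h
        simpa using h
      have hLP := (mainEL rest.length).2 rest 1
        [String.ofList ((s.toList.dropWhile isSepC).takeWhile isNameC)]
        (2 * s.toList.length + 3) (2 * (s.toList.dropWhile isSepC).length + 3)
        le_rfl le_rfl hpre (by omega) (by omega)
      simp only [Nat.zero_add, List.nil_append]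
      rw [hLP.2 _ le_rfl, if_pos rfl]
      simp
    · rw [if_neg h3, if_neg h3]
      simp
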